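-- pv_equiv track=rewrite | github.com/UofT-EcoSystem/hotline | hotline/slice.py | count_slices_in_each_op
-- ===== SOURCE A (Python) =====
-- def get_slices_at_depth(slices, depth):
--   if not slices:
--     return []
--   if len(get_unique_tracks(slices)) > 1:
--     msg = 'When getting slices at depth, found more than one track. Ambigious.'
--     log.warn(msg)
--     # raise ValueError(msg)
--   if isinstance(depth, str):
--     if depth == 'minimum':
--       depth = min([slice["depth"] for slice in slices])
--
--   return [slice for slice in slices if slice['depth'] == depth]
--
-- def get_unique_tracks(slices):
--   return sorted(set([slice["track_id"] for slice in slices]))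
--
-- def get_slices(ops, filter_by_resource='', depth=None):
--   all_slices = []
--   if not isinstance(ops, list):
--     ops = [ops]
--
--   for op in ops:
--     slices = []
--     if 'resources' in op:
--       for res_name, res in op['resources'].items():
--         if filter_by_resource in res_name and 'slices' in res:
--           s = res['slices']
--           if depth:
--             s = get_slices_at_depth(s, depth)
--           slices.extend(s)
--     all_slices.extend(slices)
--
--   return all_slices
--
-- def count_slices_in_each_op(ops):
--   # Calc slice counts
--   lengths = []
--   for op in ops:
--     lengths.append(len(get_slices(op)))
--
--   # Ranks from most to least number of slices
--   _sorted = list(reversed(sorted(lengths)))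
--   ranks = [ _sorted.index(value) + 1 for value in lengths ]
--
--   # Remove duplicates so that '[2, 1, 7, 8, 3, 3, 3, 3]' becomes '[2, 1, 7, 8, 3, 4, 5, 6]'
--   for rank in set(ranks):
--     rank_count = 0
--     for idx, r in enumerate(ranks):
--       if r == rank:
--         rank_count += 1
--         if rank_count > 1:
--           ranks[idx] += rank_count - 1
--
--   return lengths, ranks
-- ===== SOURCE B (Python) =====
-- def count_slices_in_each_op(ops):
--   # Slice counts: sum the per-resource slice-list lengths directly (no intermediate list).
--   lengths = []
--   for op in ops:
--     total = 0
--     for res in op.get('resources', {}).values():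
--       if 'slices' in res:
--         total += len(res['slices'])
--     lengths.append(total)
--
--   # Dense-within-ties ranks: sort once, map value -> base rank (first index in the
--   # descending order + 1), then add a running per-value offset in original order.
--   sd = sorted(lengths, reverse=True)
--   base = {}
--   for i, v in enumerate(sd):
--     if v not in base:
--       base[v] = i + 1
--   seen = {}
--   ranks = []
--   for v in lengths:
--     k = seen.get(v, 0)
--     ranks.append(base[v] + k)
--     seen[v] = k + 1
--
--   return lengths, ranks
-- ===== Notes on version B (the rewrite author's own statement) =====
-- stated objective: alternative
-- what changed: Ranks are computed by sorting once and mapping each value to its base rank plus a running per-value offset in original order, instead of A's per-element _sorted.index scans and a rescan pass over the list for every distinct rank (quadratic in the number of ops); per-op slice counts are summed directly instead of building a concatenated list and taking its length.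
import Mathlib
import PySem

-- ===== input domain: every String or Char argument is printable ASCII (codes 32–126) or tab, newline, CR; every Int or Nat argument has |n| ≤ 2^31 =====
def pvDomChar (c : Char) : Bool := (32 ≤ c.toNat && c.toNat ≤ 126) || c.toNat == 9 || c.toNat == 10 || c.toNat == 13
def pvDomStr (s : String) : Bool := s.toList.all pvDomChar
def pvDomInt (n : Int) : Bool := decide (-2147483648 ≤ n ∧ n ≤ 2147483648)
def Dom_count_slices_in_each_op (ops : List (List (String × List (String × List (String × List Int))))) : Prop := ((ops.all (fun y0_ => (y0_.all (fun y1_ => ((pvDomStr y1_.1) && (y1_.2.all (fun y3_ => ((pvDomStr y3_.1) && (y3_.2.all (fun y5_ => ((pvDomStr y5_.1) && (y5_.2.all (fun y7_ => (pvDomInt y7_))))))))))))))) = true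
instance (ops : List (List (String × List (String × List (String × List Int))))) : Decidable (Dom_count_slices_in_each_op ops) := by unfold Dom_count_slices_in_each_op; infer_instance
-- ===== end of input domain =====

-- B computes the dense-within-ties ranks by sorting once and adding a running per-value
-- offset in original order, instead of A's repeated _sorted.index and per-rank rescan
-- passes; the per-op slice counts are summed directly instead of building a list.

-- ===== PORT A =====
-- get_slices(op) as called here: filter_by_resource='' (the '"" in res_name' test is kept),
-- depth=None, so the 'if depth:' branch is dead and get_slices_at_depth is never reached;
-- the single dict argument is wrapped into [op] by the Python, so the helper takes one op.
-- Dicts arrive as association lists; PySem.Dict.ofList applies Python's dict() overwrite rule.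
def pvGetSlicesA (op : PySem.Dict String (List (String × List (String × List Int)))) :
    List Int :=
  if op.contains "resources" then
    (PySem.Dict.ofList ((op.get? "resources").getD [])).items.foldl
      (fun acc p =>
        if PySem.Str.isIn "" p.1 && (PySem.Dict.ofList p.2).contains "slices" then
          acc ++ ((PySem.Dict.ofList p.2).get? "slices").getD []  -- in range: key just tested
        else acc) []
  else []

-- 'for idx, r in enumerate(ranks): if r == rank: rank_count += 1; if rank_count > 1: ranks[idx] += rank_count - 1'
-- The in-place update at the current index is rendered by rebuilding the list left to right
-- with the same rank_count state.
def pvDedupPass (rank : Int) : List Int → Int → List Int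
  | [], _ => []
  | r :: rest, cnt =>
    if r = rank then
      (if cnt + 1 > 1 then r + (cnt + 1 - 1) else r) :: pvDedupPass rank rest (cnt + 1)
    else r :: pvDedupPass rank rest cnt

def count_slices_in_each_op (ops : List (List (String × List (String × List (String × List Int))))) : List Int × List Int :=
  -- lengths.append(len(get_slices(op)))
  let lengths : List Int :=
    ops.foldl (fun acc op => acc ++ [PySem.List.len (pvGetSlicesA (PySem.Dict.ofList op))]) []
  -- _sorted = list(reversed(sorted(lengths)))
  let _sorted : List Int := (PySem.List.sorted lengths (fun x => x) false).reverse
  -- ranks = [_sorted.index(value) + 1 for value in lengths]  (.index always succeeds: value ∈ _sorted)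
  let ranks : List Int :=
    lengths.map (fun v => (((PySem.List.index? _sorted v).getD 0 : Nat) : Int) + 1)
  -- for rank in set(ranks): …
  let ranks2 := (PySem.Set.ofList ranks).foldl (fun rs rank => pvDedupPass rank rs 0) ranks
  (lengths, ranks2)

-- ===== PORT B =====
-- per-op slice count: total += len(res['slices']) over op.get('resources', {}).values()
def pvOpLenB (op : List (String × List (String × List (String × List Int)))) : Int :=
  ((PySem.Dict.ofList ((PySem.Dict.ofList op).getD "resources" [])).values).foldl
    (fun total res =>
      if (PySem.Dict.ofList res).contains "slices" then
        total + PySem.List.len (((PySem.Dict.ofList res).get? "slices").getD [])  -- in range: key just tested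
      else total) 0

def count_slices_in_each_op_alt (ops : List (List (String × List (String × List (String × List Int))))) : List Int × List Int :=
  let lengths : List Int := ops.map pvOpLenB
  -- sd = sorted(lengths, reverse=True)
  let sd : List Int := PySem.List.sorted lengths (fun x => x) true
  -- base[v] = first index of v in sd, + 1
  let base : PySem.Dict Int Int :=
    (PySem.List.enumerate sd 0).foldl
      (fun b p => if b.contains p.2 then b else b.insert p.2 (p.1 + 1)) PySem.Dict.empty
  -- one pass in original order with a running per-value offset
  let st : List Int × PySem.Dict Int Int :=
    lengths.foldl
      (fun st v =>
        let k := st.2.getD v 0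
        (st.1 ++ [base.getD v 0 + k], st.2.insert v (k + 1)))  -- base[v] present: v ∈ lengths ⊆ sd
      ([], PySem.Dict.empty)
  (lengths, st.1)

-- ===== PRECONDITION & SPEC =====
def Spec_count_slices_in_each_op (ops : List (List (String × List (String × List (String × List Int))))) (out : List Int × List Int) : Prop := out = count_slices_in_each_op_alt ops
instance (ops : List (List (String × List (String × List (String × List Int))))) (out : List Int × List Int) : Decidable (Spec_count_slices_in_each_op ops out) := by unfold Spec_count_slices_in_each_op; infer_instance

-- ===== CLAIM (what is proved, stated in full; the proofs are below) =====
def Claim_equal_count_slices_in_each_op : Prop := ∀ (ops : List (List (String × List (String × List (String × List Int))))), Dom_count_slices_in_each_op ops → Spec_count_slices_in_each_op ops (count_slices_in_each_op ops)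

-- ===== LEMMAS AND PROOFS =====

theorem pv_len_eq (op : List (String × List (String × List (String × List Int)))) :
    PySem.List.len (pvGetSlicesA (PySem.Dict.ofList op)) = pvOpLenB op := by
  have h1 : ∀ s : String, PySem.Str.isIn "" s = true := by
    intro s; simp [PySem.Str.isIn, PySem.Chars.isIn_nil]
  unfold pvGetSlicesA pvOpLenB
  rw [PySem.Dict.getD_eq_get?_getD]
  by_cases hc : (PySem.Dict.ofList op).contains "resources"
  · rw [if_pos hc]
    set items := (PySem.Dict.ofList (((PySem.Dict.ofList op).get? "resources").getD [])).items with hitems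
    rw [show (PySem.Dict.ofList (((PySem.Dict.ofList op).get? "resources").getD [])).values
        = items.map (·.2) from rfl]
    simp only [h1, Bool.true_and, PySem.List.len_eq]
    rw [PySem.List.foldl_if_eq_foldl_filter, PySem.List.foldl_append_eq_flatMap]
    rw [PySem.List.foldl_if_eq_foldl_filter]
    rw [List.filter_map]
    rw [PySem.List.foldl_add (g := fun res => ((((PySem.Dict.ofList res).get? "slices").getD []).length : Int))]
    simp [List.length_flatMap]
    rfl
  · rw [if_neg hc]
    have hn : (PySem.Dict.ofList op).get? "resources" = none := by
      rw [PySem.Dict.contains_eq_isSome_get?] at hc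
      exact Option.not_isSome_iff_eq_none.mp (by simpa using hc)
    rw [hn]
    simp [PySem.List.len_eq]
    rfl

def pvGt (L : List Int) (v : Int) : Nat := L.countP (fun x => decide (v < x))
def pvF (L : List Int) (v : Int) : Int := (pvGt L v : Int) + 1

theorem pv_index_desc (sd : List Int) (hs : sd.Pairwise (fun a b => b ≤ a)) (v : Int)
    (hv : v ∈ sd) :
    PySem.List.index? sd v = some (sd.countP (fun x => decide (v < x))) := by
  induction sd with
  | nil => simp at hv
  | cons x rest ih =>
    rcases List.pairwise_cons.mp hs with ⟨hx, hs'⟩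
    by_cases hxv : x = v
    · subst hxv
      rw [PySem.List.index?_cons_self]
      have h0 : rest.countP (fun y => decide (x < y)) = 0 :=
        List.countP_eq_zero.mpr (fun y hy => by simpa using not_lt.mpr (hx y hy))
      simp [h0]
    · have hvr : v ∈ rest := by
        rcases List.mem_cons.mp hv with h | h
        · exact absurd h.symm hxv
        · exact h
      rw [PySem.List.index?_cons_of_ne rest hxv, ih hs' hvr]
      have hvx : v < x := lt_of_le_of_ne (hx v hvr) (fun h => hxv h.symm)
      simp [hvx]

theorem pv_fold_first (ps : List (Int × Int)) : ∀ (d : PySem.Dict Int Int) (v : Int),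
    (ps.foldl (fun b p => if b.contains p.2 then b else b.insert p.2 (p.1 + 1)) d).get? v
    = ((d.get? v).or ((ps.find? (fun p => p.2 == v)).map (fun p => p.1 + 1))) := by
  induction ps with
  | nil => intro d v; simp
  | cons p ps ih =>
    intro d v
    by_cases hb : d.contains p.2
    · rw [List.foldl_cons, if_pos hb, ih]
      by_cases hpv : p.2 = v
      · subst hpv
        have : ∃ w, d.get? p.2 = some w := by
          rw [PySem.Dict.contains_eq_isSome_get?] at hb
          exact Option.isSome_iff_exists.mp hb
        rcases this with ⟨w, hw⟩
        simp [hw]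
      · simp [hpv]
    · rw [List.foldl_cons, if_neg hb, ih]
      by_cases hpv : p.2 = v
      · subst hpv
        have hdn : d.get? p.2 = none := by
          rw [PySem.Dict.contains_eq_isSome_get?] at hb
          exact Option.not_isSome_iff_eq_none.mp (by simpa using hb)
        rw [PySem.Dict.get?_insert_self]
        simp [hdn]
      · rw [PySem.Dict.get?_insert_of_ne d (p.1+1) (Ne.symm hpv)]
        simp [hpv]

theorem pv_find_enum (sd : List Int) (hs : sd.Pairwise (fun a b => b ≤ a)) (v : Int)
    (hv : v ∈ sd) : ∀ s : Int,
    ((PySem.List.enumerate sd s).find? (fun p => p.2 == v))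
    = some (s + (sd.countP (fun x => decide (v < x)) : Int), v) := by
  induction sd with
  | nil => simp at hv
  | cons x rest ih =>
    intro s
    rcases List.pairwise_cons.mp hs with ⟨hx, hs'⟩
    rw [PySem.List.enumerate_cons]
    by_cases hxv : x = v
    · subst hxv
      have h0 : rest.countP (fun y => decide (x < y)) = 0 :=
        List.countP_eq_zero.mpr (fun y hy => by simpa using not_lt.mpr (hx y hy))
      simp [h0]
    · have hvr : v ∈ rest := by
        rcases List.mem_cons.mp hv with h | h
        · exact absurd h.symm hxv
        · exact h
      have hvx : v < x := lt_of_le_of_ne (hx v hvr) (fun h => hxv h.symm)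
      rw [List.find?_cons]
      have hne : ((x, v).2 == v) = true := by simp
      simp only [show ((s, x).2 == v) = false by simpa using hxv]
      rw [ih hs' hvr (s + 1)]
      simp [hvx]
      omega

theorem pv_count_map (f : Int → Int) (l : List Int) (v : Int)
    (hinj : ∀ a ∈ l, f a = f v → a = v) :
    (l.map f).count (f v) = l.count v := by
  induction l with
  | nil => simp
  | cons x xs ih =>
    have hx := hinj x (by simp)
    have ih' := ih (fun a ha => hinj a (by simp [ha]))
    by_cases hfx : f x = f v
    · have : x = v := hx hfx
      subst this
      simp [ih']
    · have : x ≠ v := fun h => hfx (by rw [h])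
      simp [ih', hfx, this]

theorem pv_gt_add_count_le (L : List Int) (v w : Int) (hvw : v < w) :
    pvGt L w + L.count w ≤ pvGt L v := by
  induction L with
  | nil => simp [pvGt]
  | cons x xs ih =>
    simp only [pvGt, List.countP_cons, List.count_cons] at *
    have hvx : w < x → v < x := fun h => hvw.trans h
    have hxw : x = w → v < x := fun h => h ▸ hvw
    by_cases h1 : w < x <;> by_cases h2 : x = w <;>
      simp [h1, h2, hvx, hvw] <;> omega

theorem pv_f_inj (L : List Int) (v w : Int) (hv : v ∈ L) (hw : w ∈ L)
    (h : pvF L v = pvF L w) : v = w := by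
  have hgt : pvGt L v = pvGt L w := by simp [pvF] at h; exact_mod_cast h
  rcases lt_trichotomy v w with hlt | heq | hgt2
  · have := pv_gt_add_count_le L v w hlt
    have hc : 0 < L.count w := List.count_pos_iff.mpr hw
    omega
  · exact heq
  · have := pv_gt_add_count_le L w v hgt2
    have hc : 0 < L.count v := List.count_pos_iff.mpr hv
    omega

def pvEnrich (T : List Int) : List Int → List Int → List Int
  | _, [] => []
  | pre, x :: rest =>
    (if x ∈ T then x + (pre.count x : Int) else x) :: pvEnrich T (pre ++ [x]) rest

def pvBOut (g : Int → Int) : List Int → List Int → List Int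
  | _, [] => []
  | pre, v :: rest => (g v + (pre.count v : Int)) :: pvBOut g (pre ++ [v]) rest

def pvNC (R0 : List Int) : Prop :=
  ∀ x ∈ R0, ∀ k : Nat, 1 ≤ k → k < R0.count x → x + (k : Int) ∉ R0

theorem pv_nocollide (L : List Int) : pvNC (L.map (pvF L)) := by
  intro x hx k hk1 hk2 hmem
  rcases List.mem_map.mp hx with ⟨v, hv, rfl⟩
  rcases List.mem_map.mp hmem with ⟨w, hw, hw2⟩
  have hcnt : (L.map (pvF L)).count (pvF L v) = L.count v :=
    pv_count_map (pvF L) L v (fun a ha h => pv_f_inj L a v ha hv h)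
  rw [hcnt] at hk2
  have hgtw : pvGt L w = pvGt L v + k := by simp [pvF] at hw2; omega
  rcases lt_trichotomy v w with hlt | heq | hgt2
  · have := pv_gt_add_count_le L v w hlt
    have hc : 0 < L.count w := List.count_pos_iff.mpr hw
    omega
  · subst heq; omega
  · have := pv_gt_add_count_le L w v hgt2
    have hc : 0 < L.count v := List.count_pos_iff.mpr hv
    omega

theorem pvEnrich_nil_T : ∀ (xs pre : List Int), pvEnrich [] pre xs = xs := by
  intro xs
  induction xs with
  | nil => intro pre; rfl
  | cons x rest ih => intro pre; simp [pvEnrich, ih]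

theorem pvEnrich_congr (T T' : List Int) (h : ∀ x : Int, x ∈ T ↔ x ∈ T') :
    ∀ (xs pre : List Int), pvEnrich T pre xs = pvEnrich T' pre xs := by
  intro xs
  induction xs with
  | nil => intro pre; rfl
  | cons x rest ih =>
    intro pre
    simp only [pvEnrich, ih]
    by_cases hx : x ∈ T
    · rw [if_pos hx, if_pos ((h x).mp hx)]
    · rw [if_neg hx, if_neg (fun hh => hx ((h x).mpr hh))]

theorem pv_pass_enrich (R0 : List Int) (hNC : pvNC R0) (r : Int) (hr : r ∈ R0)
    (T : List Int) (hrT : r ∉ T) :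
    ∀ (xs pre : List Int), pre ++ xs = R0 →
    pvDedupPass r (pvEnrich T pre xs) ((pre.count r : Nat) : Int) = pvEnrich (r :: T) pre xs := by
  intro xs
  induction xs with
  | nil => intro pre _; rfl
  | cons x rest ih =>
    intro pre hpre
    by_cases hxr : x = r
    · subst hxr
      have hhead : (if x ∈ T then x + (pre.count x : Int) else x) = x := by simp [hrT]
      simp only [pvEnrich, hhead]
      rw [pvDedupPass]
      rw [if_pos rfl]
      have hcnt : ((pre.count x : Nat) : Int) + 1 = (((pre ++ [x]).count x : Nat) : Int) := by
        simp [List.count_append]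
      have htail := ih (pre ++ [x]) (by simpa using hpre)
      rw [hcnt] at *
      rw [htail]
      by_cases h0 : pre.count x = 0
      · simp [h0]
      · have h1 : 1 ≤ pre.count x := Nat.one_le_iff_ne_zero.mpr h0
        have heq2 : (((pre ++ [x]).count x : Nat) : Int) = (pre.count x : Int) + 1 := by
          simp [List.count_append]
        have : ((pre ++ [x]).count x : Int) > 1 := by rw [heq2]; omega
        rw [if_pos this]
        simp [List.count_append]
    · have hmemx : x ∈ R0 := by rw [← hpre]; simp
      have hhead_ne : (if x ∈ T then x + (pre.count x : Int) else x) ≠ r := by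
        by_cases hxT : x ∈ T
        · rw [if_pos hxT]
          by_cases h0 : pre.count x = 0
          · simpa [h0] using hxr
          · intro hcol
            have hklt : pre.count x < R0.count x := by
              rw [← hpre, List.count_append, List.count_cons]
              simp
            exact hNC x hmemx (pre.count x) (by omega) hklt (by rw [hcol]; exact hr)
        · rw [if_neg hxT]; exact hxr
      simp only [pvEnrich]
      rw [pvDedupPass, if_neg hhead_ne]
      have htail := ih (pre ++ [x]) (by simpa using hpre)
      have hcnt : (pre ++ [x]).count r = pre.count r := by simp [List.count_append, hxr]
      rw [hcnt] at htail
      rw [htail]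
      have : (if x ∈ r :: T then x + (pre.count x : Int) else x)
           = (if x ∈ T then x + (pre.count x : Int) else x) := by
        by_cases hxT : x ∈ T <;> simp [List.mem_cons, hxr, hxT]
      rw [this]

theorem pv_fold_pass (R0 : List Int) (hNC : pvNC R0) :
    ∀ (S T : List Int), S.Nodup → (∀ x ∈ S, x ∈ R0) → (∀ x ∈ S, x ∉ T) →
    S.foldl (fun rs rank => pvDedupPass rank rs 0) (pvEnrich T [] R0) = pvEnrich (S ++ T) [] R0 := by
  intro S
  induction S with
  | nil => intro T _ _ _; simp
  | cons r S' ih =>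
    intro T hnd hmem hnT
    rw [List.foldl_cons]
    have hstep : pvDedupPass r (pvEnrich T [] R0) 0 = pvEnrich (r :: T) [] R0 := by
      have := pv_pass_enrich R0 hNC r (hmem r (by simp)) T (hnT r (by simp)) R0 [] rfl
      simpa using this
    rw [hstep]
    have hnd' := (List.nodup_cons.mp hnd).2
    have hrS' := (List.nodup_cons.mp hnd).1
    rw [ih (r :: T) hnd' (fun x hx => hmem x (by simp [hx]))
        (fun x hx => by
          simp only [List.mem_cons, not_or]
          exact ⟨fun h => hrS' (h ▸ hx), hnT x (by simp [hx])⟩)]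
    exact pvEnrich_congr _ _ (by intro x; simp [List.mem_append, List.mem_cons]; tauto) R0 []

theorem pv_enrich_bout (f : Int → Int) (T : List Int) :
    ∀ (xs pre : List Int),
    (∀ a ∈ pre ++ xs, ∀ b ∈ pre ++ xs, f a = f b → a = b) →
    (∀ x ∈ xs, f x ∈ T) →
    pvEnrich T (pre.map f) (xs.map f) = pvBOut f pre xs := by
  intro xs
  induction xs with
  | nil => intro pre _ _; rfl
  | cons x rest ih =>
    intro pre hinj hT
    simp only [List.map_cons, pvEnrich, pvBOut]
    have hx : f x ∈ T := hT x (by simp)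
    rw [if_pos hx]
    have hc : (pre.map f).count (f x) = pre.count x :=
      pv_count_map f pre x (fun a ha h => hinj a (by simp [ha]) x (by simp) h)
    rw [hc]
    have htail := ih (pre ++ [x])
      (by intro a ha b hb h; exact hinj a (by simpa [List.mem_append, List.mem_cons] using by simpa using ha) b (by simpa using hb) h)
      (fun y hy => hT y (by simp [hy]))
    simp only [List.map_append, List.map_cons, List.map_nil] at htail
    rw [htail]

theorem pv_bout_congr (g g' : Int → Int) :
    ∀ (xs : List Int), (∀ x ∈ xs, g x = g' x) → ∀ pre, pvBOut g pre xs = pvBOut g' pre xs := by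
  intro xs
  induction xs with
  | nil => intro _ _; rfl
  | cons x rest ih =>
    intro h pre
    simp only [pvBOut, h x (by simp), ih (fun y hy => h y (by simp [hy]))]

theorem pv_foldB (base : PySem.Dict Int Int) :
    ∀ (xs pre acc : List Int) (seen : PySem.Dict Int Int),
    (∀ v : Int, seen.getD v 0 = (pre.count v : Int)) →
    (xs.foldl (fun st v => (st.1 ++ [base.getD v 0 + st.2.getD v 0], st.2.insert v (st.2.getD v 0 + 1))) (acc, seen)).1
    = acc ++ pvBOut (fun v => base.getD v 0) pre xs := by
  intro xs
  induction xs with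
  | nil => intro pre acc seen _; simp [pvBOut]
  | cons x rest ih =>
    intro pre acc seen hseen
    rw [List.foldl_cons]
    have hstep := ih (pre ++ [x]) (acc ++ [base.getD x 0 + seen.getD x 0]) (seen.insert x (seen.getD x 0 + 1))
      (by
        intro v
        rw [PySem.Dict.getD_insert]
        by_cases hv : v = x
        · subst hv; simp [List.count_append, hseen v]
        · simp [hv, hseen v, List.count_append, Ne.symm hv])
    rw [hstep]
    simp [pvBOut, hseen x]

-- base-rank characterizations: both programs' base rank of v is pvF L v
theorem pv_base_getD (L : List Int) (v : Int) (hv : v ∈ L) :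
    ((PySem.List.enumerate (PySem.List.sorted L (fun x => x) true) 0).foldl
        (fun b p => if b.contains p.2 then b else b.insert p.2 (p.1 + 1)) PySem.Dict.empty).getD v 0
    = pvF L v := by
  set sd := PySem.List.sorted L (fun x => x) true with hsd
  have hs : sd.Pairwise (fun a b => b ≤ a) := PySem.List.sorted_pairwise_rev L (fun x => x)
  have hvsd : v ∈ sd := (PySem.List.sorted_perm L (fun x => x) true).mem_iff.mpr hv
  rw [PySem.Dict.getD_eq_get?_getD, pv_fold_first, pv_find_enum sd hs v hvsd 0]
  have hperm : sd.countP (fun x => decide (v < x)) = L.countP (fun x => decide (v < x)) :=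
    (PySem.List.sorted_perm L (fun x => x) true).countP_eq _
  simp [PySem.Dict.get?_empty, hperm, pvF, pvGt]

theorem pv_ranksA0 (L : List Int) (v : Int) (hv : v ∈ L) :
    (((PySem.List.index? ((PySem.List.sorted L (fun x => x) false).reverse) v).getD 0 : Nat) : Int) + 1
    = pvF L v := by
  set sdA := (PySem.List.sorted L (fun x => x) false).reverse with hsdA
  have hs : sdA.Pairwise (fun a b => b ≤ a) := by
    rw [hsdA, List.pairwise_reverse]
    exact PySem.List.sorted_pairwise L (fun x => x)
  have hvsd : v ∈ sdA := by
    rw [hsdA, List.mem_reverse]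
    exact (PySem.List.sorted_perm L (fun x => x) false).mem_iff.mpr hv
  rw [pv_index_desc sdA hs v hvsd]
  have hperm : sdA.countP (fun x => decide (v < x)) = L.countP (fun x => decide (v < x)) := by
    rw [hsdA, List.countP_reverse]
    exact (PySem.List.sorted_perm L (fun x => x) false).countP_eq _
  simp [hperm, pvF, pvGt]

-- ===== VERDICT (by name: the statement is the Claim_ definition above) =====
theorem count_slices_in_each_op_spec : Claim_equal_count_slices_in_each_op := by
  intro ops _
  unfold Spec_count_slices_in_each_op count_slices_in_each_op count_slices_in_each_op_alt
  have hL : ops.foldl (fun acc op => acc ++ [PySem.List.len (pvGetSlicesA (PySem.Dict.ofList op))]) []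
      = ops.map pvOpLenB := by
    rw [PySem.List.foldl_append_singleton_eq_map]
    simpa using List.map_congr_left (fun op _ => pv_len_eq op)
  simp only [hL]
  set L : List Int := ops.map pvOpLenB with hLdef
  refine Prod.ext rfl ?_
  set base : PySem.Dict Int Int :=
    (PySem.List.enumerate (PySem.List.sorted L (fun x => x) true) 0).foldl
      (fun b p => if b.contains p.2 then b else b.insert p.2 (p.1 + 1)) PySem.Dict.empty with hbase
  -- A's comprehension of base ranks
  have hR0 : L.map (fun v => (((PySem.List.index? ((PySem.List.sorted L (fun x => x) false).reverse) v).getD 0 : Nat) : Int) + 1)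
      = L.map (pvF L) := List.map_congr_left (fun v hv => pv_ranksA0 L v hv)
  simp only [hR0]
  set R0 : List Int := L.map (pvF L) with hR0def
  set S : List Int := PySem.Set.ofList R0 with hS
  -- A's dedup passes
  have hA : S.foldl (fun rs rank => pvDedupPass rank rs 0) R0 = pvEnrich S [] R0 := by
    have h0 : R0 = pvEnrich [] [] R0 := (pvEnrich_nil_T R0 []).symm
    calc S.foldl (fun rs rank => pvDedupPass rank rs 0) R0
        = S.foldl (fun rs rank => pvDedupPass rank rs 0) (pvEnrich [] [] R0) := by rw [← h0]
      _ = pvEnrich (S ++ []) [] R0 := by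
            exact pv_fold_pass R0 (pv_nocollide L) S [] (PySem.Set.nodup_ofList R0)
              (fun x hx => (PySem.Set.mem_ofList R0 x).mp hx) (fun x _ => List.not_mem_nil)
      _ = pvEnrich S [] R0 := by rw [List.append_nil]
  -- B's single pass
  have hB : (L.foldl (fun st v => (st.1 ++ [base.getD v 0 + st.2.getD v 0], st.2.insert v (st.2.getD v 0 + 1)))
        (([] : List Int), (PySem.Dict.empty : PySem.Dict Int Int))).1
      = pvBOut (pvF L) [] L := by
    rw [pv_foldB base L [] [] PySem.Dict.empty (fun v => by simp [PySem.Dict.getD_empty])]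
    rw [pv_bout_congr (fun v => base.getD v 0) (pvF L) L (fun v hv => pv_base_getD L v hv) []]
    simp
  -- the bridge
  have hbridge : pvEnrich S [] R0 = pvBOut (pvF L) [] L := by
    have := pv_enrich_bout (pvF L) S L []
      (by intro a ha b hb h
          simp only [List.nil_append] at ha hb
          exact pv_f_inj L a b ha hb h)
      (by intro x hx
          rw [hS, PySem.Set.mem_ofList]
          exact List.mem_map_of_mem hx)
    simpa using this
  rw [hA, hB, hbridge]
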